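-- pv_equiv track=rewrite | github.com/MualifUlilM/Automator | player.py | coalesce_mouse_moves
-- ===== SOURCE A (Python) =====
-- def coalesce_mouse_moves(aksi_list):
--     """Gabungkan mouse_move beruntun agar playback lebih halus."""
--     hasil = []
--     for aksi in aksi_list:
--         if aksi.get("jenis") == "mouse_move" and hasil and hasil[-1].get("jenis") == "mouse_move":
--             hasil[-1] = aksi
--         else:
--             hasil.append(aksi)
--     return hasil
-- ===== SOURCE B (Python) =====
-- def coalesce_mouse_moves(aksi_list):
--     """Gabungkan mouse_move beruntun agar playback lebih halus."""
--     # Pass 1: split the list into maximal consecutive runs with equal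
--     # "is this a mouse_move?" key.
--     runs = []
--     for aksi in aksi_list:
--         k = aksi.get("jenis") == "mouse_move"
--         if runs and runs[-1][0] == k:
--             runs[-1][1].append(aksi)
--         else:
--             runs.append((k, [aksi]))
--     # Pass 2: keep only the last element of each mouse_move run,
--     # every element of every other run, in order.
--     hasil = []
--     for k, group in runs:
--         if k:
--             hasil.append(group[-1])
--         else:
--             hasil.extend(group)
--     return hasil
-- ===== Notes on version B (the rewrite author's own statement) =====
-- stated objective: alternative
-- what changed: B is a two-pass groupby-style rewrite: it first forms maximal consecutive runs keyed by whether an action is a mouse_move, then reduces each mouse_move run to its last element and emits other runs whole, instead of A's single pass that overwrites the accumulator's last slot.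
import Mathlib
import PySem

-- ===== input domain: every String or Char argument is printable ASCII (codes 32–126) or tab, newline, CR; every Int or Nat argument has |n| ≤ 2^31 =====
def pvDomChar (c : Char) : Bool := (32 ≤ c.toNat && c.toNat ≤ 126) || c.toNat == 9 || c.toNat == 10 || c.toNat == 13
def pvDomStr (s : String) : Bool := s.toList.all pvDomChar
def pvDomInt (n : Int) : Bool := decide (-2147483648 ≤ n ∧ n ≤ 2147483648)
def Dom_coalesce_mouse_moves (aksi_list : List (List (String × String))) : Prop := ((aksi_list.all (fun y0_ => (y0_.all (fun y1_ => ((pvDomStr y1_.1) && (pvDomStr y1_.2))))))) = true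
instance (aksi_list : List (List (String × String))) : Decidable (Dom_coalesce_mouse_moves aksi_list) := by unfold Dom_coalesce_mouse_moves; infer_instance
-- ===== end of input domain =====

-- B replaces A's single accumulator pass (overwrite-last-slot) by a two-pass
-- groupby-style decomposition: form maximal consecutive runs keyed by
-- "is mouse_move", then keep the last element of each mouse_move run.
-- Same cost (O(n)); objective: alternative structure.

-- aksi.get("jenis") == "mouse_move"  (dict → assoc list, lookup = first match)
def pvIsMove (a : List (String × String)) : Bool :=
  (a.find? (fun kv => kv.1 == "jenis")).map (·.2) == some "mouse_move"

-- ===== PORT A =====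
def coalesce_mouse_moves (aksi_list : List (List (String × String))) : List (List (String × String)) :=
  aksi_list.foldl (fun hasil aksi =>
    if pvIsMove aksi && !hasil.isEmpty &&
       (match PySem.List.pyGet? hasil (-1) with
        | some h => pvIsMove h
        | none => false)
    then hasil.dropLast ++ [aksi]   -- hasil[-1] = aksi
    else hasil ++ [aksi]) []        -- hasil.append(aksi)

-- ===== PORT B =====
-- pass 1: runs.append / runs[-1][1].append  (tuple with mutated inner list ⇒ replace last run)
def pvRunStep (runs : List (Bool × List (List (String × String)))) (aksi : List (String × String)) :
    List (Bool × List (List (String × String))) :=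
  let k := pvIsMove aksi
  match runs.getLast? with
  | some (b, g) => if b == k then runs.dropLast ++ [(b, g ++ [aksi])] else runs ++ [(k, [aksi])]
  | none => [(k, [aksi])]

-- pass 2: last of a mouse_move run, whole run otherwise
def pvReduceRuns (runs : List (Bool × List (List (String × String)))) : List (List (String × String)) :=
  runs.flatMap (fun r =>
    if r.1 then (match r.2.getLast? with | some l => [l] | none => []) else r.2)

def coalesce_mouse_moves_alt (aksi_list : List (List (String × String))) : List (List (String × String)) :=
  pvReduceRuns (aksi_list.foldl pvRunStep [])

-- ===== PRECONDITION & SPEC =====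
def Spec_coalesce_mouse_moves (aksi_list : List (List (String × String))) (out : List (List (String × String))) : Prop := out = coalesce_mouse_moves_alt aksi_list
instance (aksi_list : List (List (String × String))) (out : List (List (String × String))) : Decidable (Spec_coalesce_mouse_moves aksi_list out) := by unfold Spec_coalesce_mouse_moves; infer_instance

-- ===== CLAIM (what is proved, stated in full; the proofs are below) =====
def Claim_equal_coalesce_mouse_moves : Prop := ∀ (aksi_list : List (List (String × String))), Dom_coalesce_mouse_moves aksi_list → Spec_coalesce_mouse_moves aksi_list (coalesce_mouse_moves aksi_list)

-- ===== LEMMAS AND PROOFS =====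

-- common recursive characterisation of the result, on a nonempty input (a = first element)
def pvSpec (a : List (String × String)) : List (List (String × String)) → List (List (String × String))
  | [] => [a]
  | x :: xs => if pvIsMove a && pvIsMove x then pvSpec x xs else a :: pvSpec x xs

-- A's loop body
def pvStepA (hasil : List (List (String × String))) (aksi : List (String × String)) : List (List (String × String)) :=
  if pvIsMove aksi && !hasil.isEmpty &&
     (match PySem.List.pyGet? hasil (-1) with
      | some h => pvIsMove h
      | none => false)
  then hasil.dropLast ++ [aksi]
  else hasil ++ [aksi]

theorem stepA_split (p q : List (List (String × String))) (hq : q ≠ []) (a : List (String × String)) :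
    pvStepA (p ++ q) a = p ++ pvStepA q a := by
  unfold pvStepA
  rcases q.eq_nil_or_concat with rfl | ⟨q', l, rfl⟩
  · exact absurd rfl hq
  · simp [PySem.List.pyGet?_neg_one, List.getLast?_append, List.dropLast_append_of_ne_nil]
    split <;> simp

theorem stepA_ne_nil (q : List (List (String × String))) (a : List (String × String)) :
    pvStepA q a ≠ [] := by
  unfold pvStepA
  split
  · simp_all
    split <;> simp
  · simp_all

theorem foldlA_split (xs : List (List (String × String)))
    (p q : List (List (String × String))) (hq : q ≠ []) :
    List.foldl pvStepA (p ++ q) xs = p ++ List.foldl pvStepA q xs := by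
  induction xs generalizing q with
  | nil => simp
  | cons x xs ih =>
      simp only [List.foldl_cons, stepA_split p q hq x]
      exact ih _ (stepA_ne_nil q x)

theorem stepA_single (a x : List (String × String)) :
    pvStepA [a] x = if pvIsMove a && pvIsMove x then [x] else [a] ++ [x] := by
  unfold pvStepA
  simp [PySem.List.pyGet?_neg_one]
  by_cases h1 : pvIsMove a = true <;> by_cases h2 : pvIsMove x = true <;> simp [h1, h2]

theorem foldA_spec (xs : List (List (String × String))) (a : List (String × String)) :
    List.foldl pvStepA [a] xs = pvSpec a xs := by
  induction xs generalizing a with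
  | nil => rfl
  | cons x xs ih =>
      simp only [List.foldl_cons, stepA_single, pvSpec]
      by_cases h : (pvIsMove a && pvIsMove x) = true
      · simp [h, ih]
      · rw [if_neg h, if_neg h, foldlA_split xs [a] [x] (by simp), ih]
        rfl

theorem runStep_split (p q : List (Bool × List (List (String × String)))) (hq : q ≠ [])
    (a : List (String × String)) :
    pvRunStep (p ++ q) a = p ++ pvRunStep q a := by
  unfold pvRunStep
  rcases q.eq_nil_or_concat with rfl | ⟨q', bg, rfl⟩
  · exact absurd rfl hq
  · obtain ⟨b, g⟩ := bg
    simp [List.getLast?_append, List.dropLast_append_of_ne_nil]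
    split <;> simp

theorem foldlR_split (xs : List (List (String × String)))
    (p q : List (Bool × List (List (String × String)))) (hq : q ≠ []) :
    List.foldl pvRunStep (p ++ q) xs = p ++ List.foldl pvRunStep q xs := by
  induction xs generalizing q with
  | nil => simp
  | cons x xs ih =>
      simp only [List.foldl_cons, runStep_split p q hq x]
      refine ih _ ?_
      unfold pvRunStep
      split
      · dsimp only
        split <;> simp
      · simp

theorem reduceRuns_append (p q : List (Bool × List (List (String × String)))) :
    pvReduceRuns (p ++ q) = pvReduceRuns p ++ pvReduceRuns q := by
  unfold pvReduceRuns; exact List.flatMap_append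

theorem foldB_spec (xs : List (List (String × String))) (a : List (String × String))
    (g : List (List (String × String))) :
    pvReduceRuns (List.foldl pvRunStep [(pvIsMove a, g ++ [a])] xs)
      = (if pvIsMove a then [] else g) ++ pvSpec a xs := by
  induction xs generalizing a g with
  | nil =>
      simp only [List.foldl_nil, pvReduceRuns, pvSpec, List.flatMap_cons, List.flatMap_nil]
      by_cases h : pvIsMove a = true <;> simp [h]
  | cons x xs ih =>
      simp only [List.foldl_cons]
      have hstep : pvRunStep [(pvIsMove a, g ++ [a])] x =
          if pvIsMove a == pvIsMove x
          then [(pvIsMove a, (g ++ [a]) ++ [x])]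
          else [(pvIsMove a, g ++ [a])] ++ [(pvIsMove x, [x])] := by
        unfold pvRunStep; simp
      rw [hstep]
      by_cases heq : pvIsMove a = pvIsMove x
      · rw [if_pos (by simp [heq])]
        have : (pvIsMove a, (g ++ [a]) ++ [x]) = (pvIsMove x, (g ++ [a]) ++ [x]) := by rw [heq]
        rw [this, ih x (g ++ [a])]
        simp only [pvSpec, heq]
        by_cases hx : pvIsMove x = true <;> simp [hx]
      · rw [if_neg (by simp [heq]),
          foldlR_split xs [(pvIsMove a, g ++ [a])] [(pvIsMove x, [x])] (by simp),
          reduceRuns_append]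
        have hx1 : ([] : List (List (String × String))) ++ [x] = [x] := rfl
        rw [← hx1, ih x []]
        simp only [pvSpec]
        have hand : (pvIsMove a && pvIsMove x) = false := by
          cases h1 : pvIsMove a <;> cases h2 : pvIsMove x <;> simp_all
        rw [hand]
        simp only [pvReduceRuns, List.flatMap_cons, List.flatMap_nil]
        by_cases ha : pvIsMove a = true <;> by_cases hx : pvIsMove x = true <;>
          simp_all

-- ===== VERDICT (by name: the statement is the Claim_ definition above) =====
theorem coalesce_mouse_moves_spec : Claim_equal_coalesce_mouse_moves := by
  intro aksi_list _
  unfold Spec_coalesce_mouse_moves coalesce_mouse_moves coalesce_mouse_moves_alt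
  cases aksi_list with
  | nil => rfl
  | cons x xs =>
      show List.foldl pvStepA [] (x :: xs) = _
      have hA : pvStepA [] x = [x] := by unfold pvStepA; simp
      have hB : pvRunStep [] x = [(pvIsMove x, [] ++ [x])] := by unfold pvRunStep; simp
      calc List.foldl pvStepA [] (x :: xs)
          = List.foldl pvStepA [x] xs := by rw [List.foldl_cons, hA]
        _ = pvSpec x xs := foldA_spec xs x
        _ = pvReduceRuns (List.foldl pvRunStep [(pvIsMove x, [] ++ [x])] xs) := by
              rw [foldB_spec]; cases h : pvIsMove x <;> simp
        _ = pvReduceRuns (List.foldl pvRunStep [] (x :: xs)) := by rw [List.foldl_cons, hB]
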